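-- pv_equiv track=rewrite | github.com/kamal3235/practice_code | vowel_change_in_string.py | vowel_change
-- ===== SOURCE A (Python) =====
-- def vowel_change(s):
--     vowel = "aeiou"
--     count_chnage = 0
--     prevoius_char = None
--     for char in s:
--         if char in vowel:
--             if prevoius_char and prevoius_char != char:
--                 count_chnage += 1
--             prevoius_char = char
--     return count_chnage
-- ===== SOURCE B (Python) =====
-- def vowel_change(s):
--     # Divide and conquer: each segment is summarized as
--     # (vowel-transition count, first vowel or None, last vowel or None),
--     # and summaries of halves are merged with a cross-boundary term.
--     def solve(t):
--         n = len(t)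
--         if n == 0:
--             return (0, None, None)
--         if n == 1:
--             return (0, t, t) if t in "aeiou" else (0, None, None)
--         m = n // 2
--         cl, fl, ll = solve(t[:m])
--         cr, fr, lr = solve(t[m:])
--         cross = 1 if ll is not None and fr is not None and ll != fr else 0
--         return (cl + cr + cross, fl if fl is not None else fr, lr if lr is not None else ll)
--     return solve(s)[0]
-- ===== Notes on version B (the rewrite author's own statement) =====
-- stated objective: alternative
-- what changed: Replaces A's single stateful streaming pass (previous-vowel accumulator) by a divide-and-conquer algorithm: each half of the string is summarized as (transition count, first vowel, last vowel) and the summaries are merged with a cross-boundary term.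
import Mathlib
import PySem

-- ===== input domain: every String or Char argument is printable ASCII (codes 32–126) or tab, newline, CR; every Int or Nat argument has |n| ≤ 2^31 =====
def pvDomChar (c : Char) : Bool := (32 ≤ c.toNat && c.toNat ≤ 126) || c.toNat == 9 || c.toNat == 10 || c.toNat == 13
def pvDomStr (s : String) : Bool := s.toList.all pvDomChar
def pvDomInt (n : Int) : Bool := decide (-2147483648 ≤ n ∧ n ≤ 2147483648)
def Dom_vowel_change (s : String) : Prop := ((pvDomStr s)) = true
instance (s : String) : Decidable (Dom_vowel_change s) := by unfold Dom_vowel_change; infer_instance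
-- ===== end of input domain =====

-- B replaces A's streaming previous-vowel pass by a divide-and-conquer on segment summaries
-- (transition count, first vowel, last vowel); objective: alternative.

-- ===== PORT A =====
-- fold state: (count_chnage, prevoius_char); Python's 'prevoius_char and …' truthiness
-- test on a one-char string is exactly 'prev ≠ none'.
def vowel_change_step (st : Int × Option Char) (ch : Char) : Int × Option Char :=
  if ch ∈ "aeiou".toList then
    (match st.2 with
     | some p => if p ≠ ch then (st.1 + 1, some ch) else (st.1, some ch)
     | none => (st.1, some ch))
  else st

def vowel_change (s : String) : Int :=
  (s.toList.foldl vowel_change_step (0, none)).1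

-- ===== PORT B =====
-- cross-boundary term: '1 if ll is not None and fr is not None and ll != fr else 0'
def vowel_change_cross : Option Char → Option Char → Int
  | some a, some b => if a ≠ b then 1 else 0
  | _, _ => 0

-- solve(t): summary (transition count, first vowel or None, last vowel or None) of t,
-- splitting t at len(t)//2 and merging the two summaries ('fl if fl is not None else fr' = Option.or).
-- 'len(t) // 2' is Nat division here: exact, since the operands are nonnegative.
def vowel_change_solve : List Char → Int × Option Char × Option Char
  | [] => (0, none, none)
  | [c] => if c ∈ "aeiou".toList then (0, some c, some c) else (0, none, none)
  | x :: y :: rest =>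
    let m := (x :: y :: rest).length / 2
    let L := vowel_change_solve ((x :: y :: rest).take m)
    let R := vowel_change_solve ((x :: y :: rest).drop m)
    (L.1 + R.1 + vowel_change_cross L.2.2 R.2.1, L.2.1.or R.2.1, R.2.2.or L.2.2)
  termination_by t => t.length
  decreasing_by
  · simp [List.length_take]
    omega
  · simp [List.length_drop]
    omega

def vowel_change_alt (s : String) : Int :=
  (vowel_change_solve s.toList).1

-- ===== PRECONDITION & SPEC =====
def Spec_vowel_change (s : String) (out : Int) : Prop := out = vowel_change_alt s
instance (s : String) (out : Int) : Decidable (Spec_vowel_change s out) := by unfold Spec_vowel_change; infer_instance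

-- ===== CLAIM (what is proved, stated in full; the proofs are below) =====
def Claim_equal_vowel_change : Prop := ∀ (s : String), Dom_vowel_change s → Spec_vowel_change s (vowel_change s)

-- ===== LEMMAS AND PROOFS =====

-- adjacent distinct-pair count of the vowel subsequence, the common denominator of both ports
def pvPairCount : List Char → Int
  | x :: y :: xs => (if x ≠ y then 1 else 0) + pvPairCount (y :: xs)
  | _ => 0

def pvOptCons (p : Option Char) (xs : List Char) : List Char :=
  match p with | some q => q :: xs | none => xs

def pvFV (t : List Char) : List Char := t.filter (fun ch => ch ∈ "aeiou".toList)

theorem pvFoldA (l : List Char) (c : Int) (p : Option Char) :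
    (l.foldl vowel_change_step (c, p)).1 = c + pvPairCount (pvOptCons p (pvFV l)) := by
  induction l generalizing c p with
  | nil => cases p <;> simp [pvOptCons, pvPairCount, pvFV]
  | cons ch tl ih =>
    by_cases h : ch ∈ "aeiou".toList
    · have hf : pvFV (ch :: tl) = ch :: pvFV tl :=
        List.filter_cons_of_pos (by simpa using h)
      rw [hf]
      cases p with
      | none =>
        rw [List.foldl_cons]
        show (tl.foldl vowel_change_step (vowel_change_step (c, none) ch)).1 = _
        rw [show vowel_change_step (c, none) ch = (c, some ch) by
          simp only [vowel_change_step, if_pos h]]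
        rw [ih]; rfl
      | some q =>
        rw [List.foldl_cons]
        show (tl.foldl vowel_change_step (vowel_change_step (c, some q) ch)).1 = _
        by_cases hq : q = ch
        · rw [show vowel_change_step (c, some q) ch = (c, some ch) by
            simp only [vowel_change_step, if_pos h]; simp [hq]]
          rw [ih]
          subst hq
          simp [pvOptCons, pvPairCount]
        · rw [show vowel_change_step (c, some q) ch = (c + 1, some ch) by
            simp only [vowel_change_step, if_pos h]; simp [hq]]
          rw [ih]
          simp only [pvOptCons, pvPairCount, if_pos (show q ≠ ch from hq)]
          ring
    · have hf : pvFV (ch :: tl) = pvFV tl :=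
        List.filter_cons_of_neg (by simpa using h)
      rw [hf, List.foldl_cons]
      rw [show vowel_change_step (c, p) ch = (c, p) by simp only [vowel_change_step, if_neg h]]
      exact ih c p

theorem pvPairCount_append (u v : List Char) :
    pvPairCount (u ++ v) = pvPairCount u + pvPairCount v + vowel_change_cross u.getLast? v.head? := by
  induction u with
  | nil => simp [pvPairCount, vowel_change_cross]
  | cons x us ih =>
    cases us with
    | nil =>
      cases v with
      | nil => simp [pvPairCount, vowel_change_cross]
      | cons y ys => by_cases h : x = y <;> simp [pvPairCount, vowel_change_cross, h] <;> ring
    | cons y zs =>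
      have h1 : pvPairCount ((x :: y :: zs) ++ v)
          = (if x ≠ y then 1 else 0) + pvPairCount ((y :: zs) ++ v) := rfl
      have h2 : pvPairCount (x :: y :: zs)
          = (if x ≠ y then 1 else 0) + pvPairCount (y :: zs) := rfl
      rw [h1, ih, h2, List.getLast?_cons_cons]
      ring

theorem pvSolve_eq (t : List Char) :
    vowel_change_solve t = (pvPairCount (pvFV t), (pvFV t).head?, (pvFV t).getLast?) := by
  induction t using vowel_change_solve.induct with
  | case1 => simp [vowel_change_solve, pvFV, pvPairCount]
  | case2 c h =>
    rw [show "aeiou".toList = ['a','e','i','o','u'] by decide] at h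
    simp only [List.mem_cons, List.not_mem_nil, or_false] at h
    rcases h with rfl|rfl|rfl|rfl|rfl <;> simp [vowel_change_solve, pvFV, pvPairCount]
  | case3 c h =>
    obtain ⟨h1, h2, h3, h4, h5⟩ : ¬c = 'a' ∧ ¬c = 'e' ∧ ¬c = 'i' ∧ ¬c = 'o' ∧ ¬c = 'u' := by
      simpa using h
    simp [vowel_change_solve, pvFV, pvPairCount, h1, h2, h3, h4, h5]
  | case4 x y rest m ih1 ih2 =>
    simp only [vowel_change_solve]
    rw [ih1, ih2]
    have hsplit := (List.take_append_drop ((x :: y :: rest).length / 2) (x :: y :: rest)).symm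
    conv_rhs => rw [hsplit]
    simp only [pvFV, List.filter_append]
    rw [pvPairCount_append, List.head?_append, List.getLast?_append]

-- ===== VERDICT (by name: the statement is the Claim_ definition above) =====
theorem vowel_change_spec : Claim_equal_vowel_change := by
  intro s _
  unfold Spec_vowel_change vowel_change vowel_change_alt
  rw [pvFoldA, pvSolve_eq]
  simp [pvOptCons]
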